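-- pv_equiv track=rewrite | github.com/JackInTaiwan/buti-recorder | butirecorder/recorders/recorder_torch.py | check_step_duplicate
-- ===== SOURCE A (Python) =====
-- def check_step_duplicate(steps, list) :
--     step_list = [pair[0] for pair in list]
--     if steps in step_list :
--         if len(step_list) > 1 and step_list.index(steps) != len(step_list) -1 :
--             raise ValueError("Method checkpoint requires no duplicate step as checkpoint.")
--         else :
--             return True
--
--     else :
--         return False
-- ===== SOURCE B (Python) =====
-- def check_step_duplicate(steps, list):
--     # True iff the list is non-empty and its last pair's step equals `steps`.
--     # (A raises ValueError whenever `steps` occurs before the last position;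
--     # outside that raising set, "present with first index = last index" is
--     # exactly "last element's step is `steps`".)
--     return bool(list) and list[-1][0] == steps
-- ===== Notes on version B (the rewrite author's own statement) =====
-- stated objective: faster
-- what changed: Replaces building the full step list and scanning it three times (`in`, `len`, `.index`) with a single O(1) check of the last element, valid because any earlier occurrence of `steps` is a raising input excluded by Pre_.
import Mathlib
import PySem

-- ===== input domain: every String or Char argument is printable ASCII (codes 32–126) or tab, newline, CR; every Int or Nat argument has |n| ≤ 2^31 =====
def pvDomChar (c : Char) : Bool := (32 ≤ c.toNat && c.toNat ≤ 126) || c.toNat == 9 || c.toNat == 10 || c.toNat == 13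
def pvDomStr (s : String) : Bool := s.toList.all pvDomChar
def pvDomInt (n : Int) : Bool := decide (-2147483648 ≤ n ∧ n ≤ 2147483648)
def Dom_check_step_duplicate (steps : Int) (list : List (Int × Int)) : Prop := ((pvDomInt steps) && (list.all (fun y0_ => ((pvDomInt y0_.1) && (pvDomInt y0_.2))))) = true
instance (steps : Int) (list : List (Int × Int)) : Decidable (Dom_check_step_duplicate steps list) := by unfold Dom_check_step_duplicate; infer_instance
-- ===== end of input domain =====

-- B replaces the build-then-triple-scan of A with an O(1) check of the last pair
-- (valid since Pre_ excludes exactly the inputs where A raises ValueError).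


-- ===== PORT A =====
-- step_list = [pair[0] for pair in list]; `in`, len, .index as in A; the raise
-- branch (unreachable under Pre_) is marked by returning false.
def check_step_duplicate (steps : Int) (list : List (Int × Int)) : Bool :=
  let step_list := list.map Prod.fst
  if step_list.contains steps then
    if step_list.length > 1 && (PySem.List.index? step_list steps != some (step_list.length - 1)) then
      false  -- Python: raise ValueError(...); excluded by Pre_check_step_duplicate
    else
      true
  else
    false

-- ===== PORT B =====
-- return bool(list) and list[-1][0] == steps
def check_step_duplicate_alt (steps : Int) (list : List (Int × Int)) : Bool :=
  match list.getLast? with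
  | none => false
  | some p => p.1 == steps

-- ===== PRECONDITION & SPEC =====
-- Pre_ excludes exactly the inputs on which A raises ValueError: those where
-- `steps` occurs as the first component of some pair before the last one.
def Pre_check_step_duplicate (steps : Int) (list : List (Int × Int)) : Prop :=
  steps ∉ list.dropLast.map Prod.fst
instance (steps : Int) (list : List (Int × Int)) : Decidable (Pre_check_step_duplicate steps list) := by unfold Pre_check_step_duplicate; infer_instance

def pvWitness_check_step_duplicate : Int × (List (Int × Int)) := (2, [(1, 0), (2, 5)])

def Spec_check_step_duplicate (steps : Int) (list : List (Int × Int)) (out : Bool) : Prop := out = check_step_duplicate_alt steps list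
instance (steps : Int) (list : List (Int × Int)) (out : Bool) : Decidable (Spec_check_step_duplicate steps list out) := by unfold Spec_check_step_duplicate; infer_instance

-- ===== CLAIM (what is proved, stated in full; the proofs are below) =====
def Claim_equal_check_step_duplicate : Prop := ∀ (steps : Int) (list : List (Int × Int)), Dom_check_step_duplicate steps list → Pre_check_step_duplicate steps list → Spec_check_step_duplicate steps list (check_step_duplicate steps list)

-- ===== LEMMAS AND PROOFS =====

-- On a concat list xs ++ [y], under Pre_ (steps ∉ xs.map fst), both ports agree.
theorem check_eq_concat (steps : Int) (xs : List (Int × Int)) (y : Int × Int)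
    (h : steps ∉ xs.map Prod.fst) :
    check_step_duplicate steps (xs ++ [y]) = check_step_duplicate_alt steps (xs ++ [y]) := by
  unfold check_step_duplicate check_step_duplicate_alt
  simp only [List.map_append, List.map_cons, List.map_nil, List.getLast?_concat]
  by_cases hy : y.1 = steps
  · subst hy
    rw [PySem.List.index?_append_singleton_self _ _ h]
    simp [List.length_append]
  · have hnc : steps ∉ xs.map Prod.fst ++ [y.1] := by
      simp only [List.mem_append, List.mem_singleton]
      rintro (h1 | h2)
      · exact h h1
      · exact hy h2.symm
    simp [hnc, hy]

-- ===== VERDICT (by name: the statement is the Claim_ definition above) =====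
theorem check_step_duplicate_spec : Claim_equal_check_step_duplicate := by
  intro steps list _ hpre
  unfold Spec_check_step_duplicate
  rcases List.eq_nil_or_concat list with rfl | ⟨xs, y, rfl⟩
  · rfl
  · have h : steps ∉ xs.map Prod.fst := by
      unfold Pre_check_step_duplicate at hpre
      simpa [List.dropLast_concat] using hpre
    rw [List.concat_eq_append] at *
    exact check_eq_concat steps xs y h
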